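-- pv_equiv track=rewrite | github.com/TITANMODE/ide | ide.py | table_find
-- ===== SOURCE A (Python) =====
-- def table_find(haystack, needle, init=1):
--     if not isinstance(haystack, dict):
--         raise Exception("table.find expects a table")
--     max_index = table_maxn(haystack)
--     for i in range(int(init), max_index + 1):
--         if haystack.get(i) == needle:
--             return i
--     return None
--
-- def table_maxn(t):
--     if not isinstance(t, dict):
--         raise Exception("table.maxn expects a table")
--     max_key = 0
--     for key in t:
--         if isinstance(key, int) or (isinstance(key, float) and key.is_integer()):
--             k = int(key)
--             if k > max_key:
--                 max_key = k
--     return max_key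
-- ===== SOURCE B (Python) =====
-- def table_find(haystack, needle, init=1):
--     if not isinstance(haystack, dict):
--         raise Exception("table.find expects a table")
--     init = int(init)
--     best = None
--     for k, v in haystack.items():
--         if k >= init and v == needle and (best is None or k < best):
--             best = k
--     return best
-- ===== Notes on version B (the rewrite author's own statement) =====
-- stated objective: faster
-- what changed: Instead of scanning every integer from init up to the maximum key and probing the dict at each one, B makes a single pass over the dict's items keeping the smallest key >= init whose value equals needle.
import Mathlib
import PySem

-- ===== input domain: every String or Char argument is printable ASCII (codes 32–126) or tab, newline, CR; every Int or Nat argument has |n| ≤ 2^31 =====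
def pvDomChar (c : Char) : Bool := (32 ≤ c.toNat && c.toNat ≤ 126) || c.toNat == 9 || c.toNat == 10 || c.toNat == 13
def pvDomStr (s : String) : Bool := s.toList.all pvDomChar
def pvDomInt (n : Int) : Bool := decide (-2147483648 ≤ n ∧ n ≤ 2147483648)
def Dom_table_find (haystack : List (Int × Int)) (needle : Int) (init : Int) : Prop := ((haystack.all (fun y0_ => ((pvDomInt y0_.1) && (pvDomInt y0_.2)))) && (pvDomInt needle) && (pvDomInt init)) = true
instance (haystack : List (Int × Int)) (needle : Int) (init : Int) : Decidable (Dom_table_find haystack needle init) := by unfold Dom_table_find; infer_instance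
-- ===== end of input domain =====

-- B replaces A's scan over every integer in [init, max_key] (probing the dict at each)
-- by one pass over the dict's items keeping the smallest key ≥ init whose value is needle.

-- ===== PORT A =====
-- table_maxn: max_key = 0; for key in t: if key > max_key: max_key = key  (all keys are ints here)
def pvMaxn (t : List (Int × Int)) : Int :=
  t.foldl (fun max_key kv => if kv.1 > max_key then kv.1 else max_key) 0

-- the 'for i in range(...)' loop with its early return
def pvFindLoop (haystack : List (Int × Int)) (needle : Int) : List Int → Option Int
  | [] => none
  | i :: rest =>
      if (PySem.Dict.mk haystack).get? i = some needle then some i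
      else pvFindLoop haystack needle rest

def table_find (haystack : List (Int × Int)) (needle : Int) (init : Int) : Option Int :=
  let max_index := pvMaxn haystack
  pvFindLoop haystack needle (PySem.List.pyRange init (max_index + 1) 1)

-- ===== PORT B =====
-- the loop body: 'if k >= init and v == needle and (best is None or k < best): best = k'
def pvStep (needle : Int) (init : Int) (best : Option Int) (kv : Int × Int) : Option Int :=
  if init ≤ kv.1 ∧ kv.2 = needle ∧ (best = none ∨ ∃ b, best = some b ∧ kv.1 < b) then
    some kv.1
  else best

def table_find_alt (haystack : List (Int × Int)) (needle : Int) (init : Int) : Option Int :=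
  haystack.foldl (pvStep needle init) none

-- ===== PRECONDITION & SPEC =====
-- Pre_ excludes association lists with duplicate keys: those do not represent any Python
-- dict (dict construction collapses them), so first-match list lookup is not A's dict lookup there.
def Pre_table_find (haystack : List (Int × Int)) (needle : Int) (init : Int) : Prop :=
  (haystack.map Prod.fst).Nodup
instance (haystack : List (Int × Int)) (needle : Int) (init : Int) : Decidable (Pre_table_find haystack needle init) := by unfold Pre_table_find; infer_instance

def pvWitness_table_find : (List (Int × Int)) × Int × Int := ([(1, 7), (3, 5), (-2, 5)], 5, 1)

def Spec_table_find (haystack : List (Int × Int)) (needle : Int) (init : Int) (out : Option Int) : Prop := out = table_find_alt haystack needle init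
instance (haystack : List (Int × Int)) (needle : Int) (init : Int) (out : Option Int) : Decidable (Spec_table_find haystack needle init out) := by unfold Spec_table_find; infer_instance

-- ===== CLAIM (what is proved, stated in full; the proofs are below) =====
def Claim_equal_table_find : Prop := ∀ (haystack : List (Int × Int)) (needle : Int) (init : Int), Dom_table_find haystack needle init → Pre_table_find haystack needle init → Spec_table_find haystack needle init (table_find haystack needle init)

-- ===== LEMMAS AND PROOFS =====

-- the filtered key list B effectively minimises over
def pvCands (haystack : List (Int × Int)) (needle : Int) (init : Int) : List Int :=
  (haystack.filter (fun kv => decide (init ≤ kv.1) && decide (kv.2 = needle))).map Prod.fst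

-- step equations
lemma pvStep_none (needle init : Int) (kv : Int × Int) :
    pvStep needle init none kv
      = if init ≤ kv.1 ∧ kv.2 = needle then some kv.1 else none := by
  unfold pvStep
  by_cases hc : init ≤ kv.1 ∧ kv.2 = needle
  · rw [if_pos ⟨hc.1, hc.2, Or.inl rfl⟩, if_pos hc]
  · rw [if_neg (fun h => hc ⟨h.1, h.2.1⟩), if_neg hc]

lemma pvStep_some (needle init b : Int) (kv : Int × Int) :
    pvStep needle init (some b) kv
      = if init ≤ kv.1 ∧ kv.2 = needle ∧ kv.1 < b then some kv.1 else some b := by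
  unfold pvStep
  by_cases hc : init ≤ kv.1 ∧ kv.2 = needle ∧ kv.1 < b
  · rw [if_pos ⟨hc.1, hc.2.1, Or.inr ⟨b, rfl, hc.2.2⟩⟩, if_pos hc]
  · have hneg : ¬(init ≤ kv.1 ∧ kv.2 = needle ∧
        ((some b : Option Int) = none ∨ ∃ b', (some b : Option Int) = some b' ∧ kv.1 < b')) := by
      rintro ⟨h1, h2, hnone | ⟨b', hb', hlt'⟩⟩
      · exact Option.some_ne_none b hnone
      · injection hb' with e
        exact hc ⟨h1, h2, e ▸ hlt'⟩
    rw [if_neg hneg, if_neg hc]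

-- B's fold is min? of the candidate keys
lemma alt_foldl_min (needle init : Int) (l : List (Int × Int)) (acc : Option Int) :
    l.foldl (pvStep needle init) acc
    = (match acc with
       | none => (pvCands l needle init).min?
       | some b => some ((pvCands l needle init).foldl min b)) := by
  induction l generalizing acc with
  | nil => cases acc <;> simp [pvCands]
  | cons kv rest ih =>
    by_cases hc : init ≤ kv.1 ∧ kv.2 = needle
    · have hf : pvCands (kv :: rest) needle init = kv.1 :: pvCands rest needle init := by
        simp [pvCands, hc.1, hc.2]
      cases acc with
      | none =>
        rw [List.foldl_cons, pvStep_none, if_pos hc, ih, hf, List.min?_cons']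
      | some b =>
        rw [List.foldl_cons, pvStep_some, hf]
        by_cases hlt : kv.1 < b
        · rw [if_pos ⟨hc.1, hc.2, hlt⟩, ih]
          have hmin : min b kv.1 = kv.1 := by omega
          simp [hmin]
        · rw [if_neg (fun h => hlt h.2.2), ih]
          have hmin : min b kv.1 = b := by omega
          simp [hmin]
    · have hf : pvCands (kv :: rest) needle init = pvCands rest needle init := by
        rcases not_and_or.mp hc with h | h <;> simp [pvCands, h]
      cases acc with
      | none =>
        rw [List.foldl_cons, pvStep_none, if_neg hc, ih, hf]
      | some b =>
        rw [List.foldl_cons, pvStep_some, if_neg (fun h => hc ⟨h.1, h.2.1⟩), ih, hf]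

lemma alt_eq_min? (haystack : List (Int × Int)) (needle init : Int) :
    table_find_alt haystack needle init = (pvCands haystack needle init).min? := by
  unfold table_find_alt
  rw [alt_foldl_min]

lemma mem_pvCands (haystack : List (Int × Int)) (needle init k : Int) :
    k ∈ pvCands haystack needle init ↔ init ≤ k ∧ (k, needle) ∈ haystack := by
  constructor
  · intro hk
    rcases List.mem_map.mp hk with ⟨⟨k', v'⟩, hmem, hfst⟩
    rcases List.mem_filter.mp hmem with ⟨hin, hcond⟩
    simp only [Bool.and_eq_true, decide_eq_true_eq] at hcond
    cases hfst
    exact ⟨hcond.1, hcond.2 ▸ hin⟩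
  · rintro ⟨hle, hmem⟩
    exact List.mem_map.mpr ⟨(k, needle), List.mem_filter.mpr ⟨hmem, by simp [hle]⟩, rfl⟩

-- every key is ≤ pvMaxn
lemma key_le_pvMaxn (haystack : List (Int × Int)) (k v : Int) (hmem : (k, v) ∈ haystack) :
    k ≤ pvMaxn haystack := by
  have hfun : pvMaxn haystack = (haystack.map Prod.fst).foldl max 0 := by
    unfold pvMaxn
    rw [List.foldl_map]
    congr 1
    funext a kv
    simp [max_def]
    omega
  rw [hfun]
  exact (PySem.List.le_foldl_max (haystack.map Prod.fst) 0).2 k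
    (List.mem_map.mpr ⟨(k, v), hmem, rfl⟩)

-- dict lookup ↔ list membership, given unique keys
lemma get?_iff_mem (haystack : List (Int × Int)) (needle k : Int)
    (hnd : (haystack.map Prod.fst).Nodup) :
    (PySem.Dict.mk haystack).get? k = some needle ↔ (k, needle) ∈ haystack := by
  constructor
  · intro h
    exact PySem.Dict.mem_items_of_get?_eq_some (PySem.Dict.mk haystack) h
  · intro h
    exact PySem.Dict.get?_of_mem_items (PySem.Dict.mk haystack) h hnd

-- A's loop is find? over its list
lemma pvFindLoop_eq_find? (haystack : List (Int × Int)) (needle : Int) (l : List Int) :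
    pvFindLoop haystack needle l
      = l.find? (fun i => decide ((PySem.Dict.mk haystack).get? i = some needle)) := by
  induction l with
  | nil => rfl
  | cons i rest ih =>
    by_cases h : (PySem.Dict.mk haystack).get? i = some needle
    · simp [pvFindLoop, h]
    · simp [pvFindLoop, h, ih]

-- find? on a strictly increasing list returns the least element satisfying p
lemma find?_sorted_eq_some (l : List Int) (p : Int → Bool) (m : Int)
    (hsort : l.Pairwise (· < ·)) (hm : m ∈ l) (hpm : p m = true)
    (hmin : ∀ x ∈ l, p x = true → m ≤ x) :
    l.find? p = some m := by
  induction l with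
  | nil => cases hm
  | cons x rest ih =>
    rcases List.pairwise_cons.mp hsort with ⟨hlt, hrest⟩
    by_cases hx : p x = true
    · have h1 : m ≤ x := hmin x List.mem_cons_self hx
      have h2 : x ≤ m := by
        rcases List.mem_cons.mp hm with rfl | hmem
        · exact le_refl m
        · exact le_of_lt (hlt m hmem)
      have : m = x := le_antisymm h1 h2
      subst this
      exact List.find?_cons_of_pos hpm
    · have hmem : m ∈ rest := by
        rcases List.mem_cons.mp hm with rfl | hmem
        · exact absurd hpm hx
        · exact hmem
      rw [List.find?_cons_of_neg hx]
      exact ih hrest hmem (fun x hx' hp => hmin x (List.mem_cons_of_mem _ hx') hp)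

-- ===== VERDICT (by name: the statement is the Claim_ definition above) =====
theorem table_find_spec : Claim_equal_table_find := by
  intro haystack needle init _hdom hpre
  unfold Spec_table_find
  rw [alt_eq_min?]
  unfold table_find
  rw [pvFindLoop_eq_find?]
  cases hmin : (pvCands haystack needle init).min? with
  | none =>
    have hempty : pvCands haystack needle init = [] := List.min?_eq_none_iff.mp hmin
    rw [List.find?_eq_none.mpr]
    intro i hi
    simp only [decide_eq_true_eq]
    intro hget
    have hmem : (i, needle) ∈ haystack := (get?_iff_mem haystack needle i hpre).mp hget
    have hrange := (PySem.List.mem_pyRange_one).mp hi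
    have : i ∈ pvCands haystack needle init :=
      (mem_pvCands haystack needle init i).mpr ⟨hrange.1, hmem⟩
    rw [hempty] at this
    cases this
  | some m =>
    rcases List.min?_eq_some_iff.mp hmin with ⟨hmem, hminimal⟩
    rcases (mem_pvCands haystack needle init m).mp hmem with ⟨hle, hpair⟩
    apply find?_sorted_eq_some
    · exact PySem.List.pairwise_lt_pyRange_one init (pvMaxn haystack + 1)
    · exact (PySem.List.mem_pyRange_one).mpr
        ⟨hle, by have := key_le_pvMaxn haystack m needle hpair; omega⟩
    · simp only [decide_eq_true_eq]
      exact (get?_iff_mem haystack needle m hpre).mpr hpair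
    · intro x hx hpx
      simp only [decide_eq_true_eq] at hpx
      have hmemx : (x, needle) ∈ haystack := (get?_iff_mem haystack needle x hpre).mp hpx
      have hrange := (PySem.List.mem_pyRange_one).mp hx
      exact hminimal x ((mem_pvCands haystack needle init x).mpr ⟨hrange.1, hmemx⟩)
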